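-- pv_equiv track=rewrite | github.com/emmanuel-bonin/advent-of-code | 2023/day09/part1.py | predicate
-- ===== SOURCE A (Python) =====
-- def predicate(data):
--   data[len(data) - 1].append(0)
--   i = len(data) - 2
--   while i >= 0:
--     prev_data = data[i + 1][len(data[i + 1]) - 1]
--     cur_data = data[i][len(data[i]) - 1]
--     data[i].append(prev_data + cur_data)
--     i -= 1
--   return data
-- ===== SOURCE B (Python) =====
-- def predicate(data):
--     data[len(data) - 1].append(0)
--     vals = [row[-1] for row in data[:-1]]
--     total = 0
--     suffixes = []
--     for v in reversed(vals):
--         total += v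
--         suffixes.append(total)
--     suffixes.reverse()
--     for row, s in zip(data[:-1], suffixes):
--         row.append(s)
--     return data
-- ===== Notes on version B (the rewrite author's own statement) =====
-- stated objective: alternative
-- what changed: A walks the rows bottom-up, re-reading the just-appended value from the row below at each step; B extracts the last column once, computes its suffix sums in a single reversed accumulation pass, and appends them in a second loop.
import Mathlib
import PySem

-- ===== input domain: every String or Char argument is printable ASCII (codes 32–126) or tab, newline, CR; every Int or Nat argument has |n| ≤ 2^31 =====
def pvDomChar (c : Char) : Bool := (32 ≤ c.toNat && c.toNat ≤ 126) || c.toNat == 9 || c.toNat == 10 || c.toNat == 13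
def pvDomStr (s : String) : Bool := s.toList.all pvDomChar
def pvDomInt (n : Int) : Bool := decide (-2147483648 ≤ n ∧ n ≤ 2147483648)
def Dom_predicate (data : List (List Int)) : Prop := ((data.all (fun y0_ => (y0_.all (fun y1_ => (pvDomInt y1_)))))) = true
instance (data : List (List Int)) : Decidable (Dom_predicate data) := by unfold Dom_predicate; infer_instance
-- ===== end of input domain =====

-- B replaces A's interleaved upward read-from-the-structure with a column extraction plus a
-- suffix-sum pass; equivalence is about the RETURN value (both Pythons mutate the rows of
-- `data` in place in the same way).

-- ===== PORT A =====
-- while-loop with i = n-2 .. 0; fuel n+1 means current index i = n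
def predLoopA : List (List Int) → Nat → List (List Int)
  | d, 0 => d
  | d, n+1 =>
    let i := n
    let row1 := d.getD (i+1) []
    let prevData := row1.getD (row1.length - 1) 0
    let row0 := d.getD i []
    let curData := row0.getD (row0.length - 1) 0
    predLoopA (d.set i (row0 ++ [prevData + curData])) n

def predicate (data : List (List Int)) : List (List Int) :=
  let n := data.length
  let d := data.set (n - 1) (data.getD (n - 1) [] ++ [0])
  predLoopA d (n - 1)

-- ===== PORT B =====
def predicate_alt (data : List (List Int)) : List (List Int) :=
  let d := data.set (data.length - 1) (data.getD (data.length - 1) [] ++ [0])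
  let front := d.dropLast
  let vals := front.map (fun r => r.getD (r.length - 1) 0)
  let p := vals.reverse.foldl (fun (st : Int × List Int) v => (st.1 + v, st.2 ++ [st.1 + v])) ((0 : Int), ([] : List Int))
  let suffixes := p.2.reverse
  (front.zip suffixes).map (fun q => q.1 ++ [q.2]) ++ d.drop front.length

-- ===== PRECONDITION & SPEC =====
-- Pre_: exactly where the Python A returns: empty data or an empty non-last row raises IndexError.
def Pre_predicate (data : List (List Int)) : Prop :=
  data ≠ [] ∧ ∀ r ∈ data.dropLast, r ≠ []
instance (data : List (List Int)) : Decidable (Pre_predicate data) := by unfold Pre_predicate; infer_instance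
def pvWitness_predicate : List (List Int) := [[1, 2], [3], [4]]

def Spec_predicate (data : List (List Int)) (out : List (List Int)) : Prop := out = predicate_alt data
instance (data : List (List Int)) (out : List (List Int)) : Decidable (Spec_predicate data out) := by unfold Spec_predicate; infer_instance

-- ===== CLAIM (what is proved, stated in full; the proofs are below) =====
def Claim_equal_predicate : Prop := ∀ (data : List (List Int)), Dom_predicate data → Pre_predicate data → Spec_predicate data (predicate data)

-- ===== LEMMAS AND PROOFS =====

-- last element of a row, the way both ports read it
def lastOf (r : List Int) : Int := r.getD (r.length - 1) 0

theorem lastOf_append (r : List Int) (x : Int) : lastOf (r ++ [x]) = x := by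
  simp [lastOf]

theorem getD_set (l : List (List Int)) (i j : Nat) (x : List Int) :
    (l.set i x).getD j [] = if j = i ∧ i < l.length then x else l.getD j [] := by
  simp only [List.getD, List.getElem?_set]
  by_cases hij : i = j
  · subst hij
    by_cases hl : i < l.length
    · simp [hl]
    · simp [hl]
  · have hji : ¬ j = i := fun h => hij h.symm
    simp [hij, hji]

theorem predLoopA_length (d : List (List Int)) (n : Nat) :
    (predLoopA d n).length = d.length := by
  induction n generalizing d with
  | zero => rfl
  | succ n ih => simp [predLoopA, ih]

theorem predLoopA_getD (m : Nat) (d : List (List Int)) (hm : m < d.length) (i : Nat) :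
    (predLoopA d m).getD i [] =
      if i < m then d.getD i [] ++ [∑ j ∈ Finset.Ico i (m+1), lastOf (d.getD j [])]
      else d.getD i [] := by
  induction m generalizing d with
  | zero => simp [predLoopA]
  | succ m ih =>
    simp only [predLoopA]
    set v : Int := lastOf (d.getD (m+1) []) + lastOf (d.getD m []) with hv
    have hrow : (d.getD (m+1) []).getD ((d.getD (m+1) []).length - 1) 0 = lastOf (d.getD (m+1) []) := rfl
    have hlen : m < (d.set m (d.getD m [] ++ [v])).length := by simp; omega
    rw [show (d.getD m []).getD ((d.getD m []).length - 1) 0 = lastOf (d.getD m []) from rfl, hrow]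
    rw [ih _ hlen]
    have hset : ∀ j, (d.set m (d.getD m [] ++ [v])).getD j [] =
        if j = m then d.getD m [] ++ [v] else d.getD j [] := by
      intro j
      rw [getD_set]
      split_ifs with h1 h2 h3
      · rfl
      · omega
      · omega
      · rfl
    by_cases hi : i < m
    · simp only [hi, if_pos, if_pos (by omega : i < m + 1)]
      rw [hset]
      simp only [if_neg (by omega : ¬ i = m)]
      congr 2
      have hsum1 : ∑ j ∈ Finset.Ico i (m+1), lastOf ((d.set m (d.getD m [] ++ [v])).getD j []) =
          (∑ j ∈ Finset.Ico i m, lastOf ((d.set m (d.getD m [] ++ [v])).getD j [])) +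
            lastOf ((d.set m (d.getD m [] ++ [v])).getD m []) :=
        Finset.sum_Ico_succ_top (by omega) _
      rw [hsum1]
      have hsum2 : ∑ j ∈ Finset.Ico i m, lastOf ((d.set m (d.getD m [] ++ [v])).getD j []) =
          ∑ j ∈ Finset.Ico i m, lastOf (d.getD j []) := by
        apply Finset.sum_congr rfl
        intro j hj
        rw [hset]
        rw [if_neg (by simp at hj; omega)]
      rw [hsum2, hset, if_pos rfl, lastOf_append]
      rw [Finset.sum_Ico_succ_top (by omega : i ≤ m + 1),
          Finset.sum_Ico_succ_top (by omega : i ≤ m)]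
      ring
    · by_cases him : i = m
      · subst him
        simp only [if_neg (lt_irrefl i), if_pos (by omega : i < i + 1)]
        rw [hset, if_pos rfl]
        congr 2
        rw [Finset.sum_Ico_succ_top (by omega : i ≤ i + 1),
            Finset.sum_Ico_succ_top (by omega : i ≤ i),
            Finset.Ico_self, Finset.sum_empty, hv]
        ring
      · simp only [if_neg hi, if_neg (by omega : ¬ i < m + 1)]
        rw [hset, if_neg him]

-- the reversed-fold of B: closed form of the accumulator
theorem foldB_spec (l : List Int) (t : Int) (acc : List Int) :
    l.foldl (fun (st : Int × List Int) v => (st.1 + v, st.2 ++ [st.1 + v])) (t, acc) =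
      (t + l.sum, acc ++ (List.range l.length).map (fun k => t + ((l.take (k+1)).sum))) := by
  induction l generalizing t acc with
  | nil => simp
  | cons v tl ih =>
    simp only [List.foldl_cons, ih, List.length_cons, List.sum_cons]
    rw [Prod.mk.injEq]
    refine ⟨by ring, ?_⟩
    rw [List.range_succ_eq_map, List.map_cons, List.map_map, List.append_assoc]
    congr 1
    simp only [List.take_succ_cons, List.sum_cons, List.take_zero, List.sum_nil, add_zero,
      List.singleton_append]
    congr 1
    apply List.map_congr_left
    intro k _
    simp only [Function.comp]
    ring

-- sum of a dropped suffix as a Finset.Ico sum over getD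
theorem sum_drop_eq_Ico (l : List Int) (i : Nat) :
    (l.drop i).sum = ∑ j ∈ Finset.Ico i l.length, l.getD j 0 := by
  induction l generalizing i with
  | nil => simp
  | cons x tl ih =>
    cases i with
    | zero =>
      simp only [List.drop_zero, List.sum_cons, List.length_cons]
      rw [Nat.Ico_zero_eq_range, Finset.sum_range_succ']
      have h1 : ∑ j ∈ Finset.range tl.length, (x :: tl).getD (j + 1) 0 =
          ∑ j ∈ Finset.range tl.length, tl.getD j 0 := by
        apply Finset.sum_congr rfl; intro j _; rw [List.getD_cons_succ]
      have h2 := ih 0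
      simp only [List.drop_zero, Nat.Ico_zero_eq_range] at h2
      rw [h1, List.getD_cons_zero, h2]
      exact add_comm _ _
    | succ i =>
      simp only [List.drop_succ_cons, List.length_cons]
      rw [ih i]
      rw [Finset.sum_Ico_eq_sum_range, Finset.sum_Ico_eq_sum_range]
      apply Finset.sum_congr (by congr 1; omega)
      intro j _
      rw [show i + 1 + j = (i + j) + 1 by omega, List.getD_cons_succ]

theorem predicate_spec_aux (data : List (List Int)) (hne : data ≠ []) :
    predicate data = predicate_alt data := by
  simp only [predicate, predicate_alt]
  set n := data.length with hn
  have hnpos : 0 < n := List.length_pos_of_ne_nil hne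
  set d := data.set (n - 1) (data.getD (n - 1) [] ++ [0]) with hd
  have hdlen : d.length = n := by rw [hd]; simp only [List.length_set]; omega
  set m := n - 1 with hm
  have hmlt : m < d.length := by omega
  -- the front rows of d are the front rows, length m
  have hfrontlen : d.dropLast.length = m := by simp only [List.length_dropLast]; omega
  set front := d.dropLast with hfront
  set vals := front.map (fun r => r.getD (r.length - 1) 0) with hvals
  have hvalslen : vals.length = m := by simp [hvals, hfrontlen]
  -- the suffix list
  rw [foldB_spec]
  simp only [List.nil_append]
  set suffixes := ((List.range vals.reverse.length).map
      (fun k => (0 : Int) + ((vals.reverse.take (k+1)).sum))).reverse with hsuf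
  have hsuflen : suffixes.length = m := by simp [hsuf, hvalslen]
  -- getD of front
  have hfront_getD : ∀ i, i < m → front.getD i [] = d.getD i [] := by
    intro i hi
    have h1 : i < front.length := by omega
    have h2 : i < d.length := by omega
    rw [List.getD_eq_getElem _ _ h1, List.getD_eq_getElem _ _ h2]
    simp [hfront, List.getElem_dropLast]
  -- vals entries are lastOf of d rows
  have hvals_getD : ∀ j, j < m → vals.getD j 0 = lastOf (d.getD j []) := by
    intro j hj
    have h1 : j < vals.length := by omega
    rw [List.getD_eq_getElem _ _ h1]
    simp only [hvals, List.getElem_map]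
    rw [show front[j] = front.getD j [] from (List.getD_eq_getElem _ _ (by omega)).symm]
    rw [hfront_getD j hj]
    rfl
  -- suffix entries
  have hsuf_getD : ∀ i, i < m → suffixes.getD i 0 = ∑ j ∈ Finset.Ico i m, lastOf (d.getD j []) := by
    intro i hi
    have hlen1 : ((List.range vals.reverse.length).map
        (fun k => (0 : Int) + ((vals.reverse.take (k+1)).sum))).length = m := by
      simp [hvalslen]
    have h1 : i < suffixes.length := by omega
    rw [List.getD_eq_getElem _ _ h1]
    simp only [hsuf]
    rw [List.getElem_reverse]
    rw [List.getElem_map]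
    rw [List.getElem_range]
    have hidx : ((List.range vals.reverse.length).map
        (fun k => (0 : Int) + ((vals.reverse.take (k+1)).sum))).length - 1 - i + 1 = m - i := by
      rw [hlen1]; omega
    rw [hidx]
    have htake : vals.reverse.take (m - i) = (vals.drop i).reverse := by
      rw [List.take_reverse]
      congr 1
      rw [hvalslen]
      congr 1
      omega
    rw [htake, List.sum_reverse, zero_add, sum_drop_eq_Ico]
    rw [hvalslen]
    apply Finset.sum_congr rfl
    intro j hj
    simp only [Finset.mem_Ico] at hj
    exact hvals_getD j hj.2
  -- final extensionality
  have hAlen : (predLoopA d m).length = n := by rw [predLoopA_length]; omega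
  have hBlen : ((front.zip suffixes).map (fun q => q.1 ++ [q.2]) ++ d.drop front.length).length = n := by
    simp [hfrontlen, hsuflen, hdlen]
    omega
  apply List.ext_getElem (by omega)
  intro i h1 h2
  rw [show (predLoopA d m)[i] = (predLoopA d m).getD i [] from
    (List.getD_eq_getElem _ _ h1).symm]
  rw [predLoopA_getD m d hmlt i]
  have hziplen : ((front.zip suffixes).map (fun q => q.1 ++ [q.2])).length = m := by
    simp [hfrontlen, hsuflen]
  by_cases hi : i < m
  · rw [List.getElem_append_left (by omega)]
    rw [List.getElem_map]
    rw [List.getElem_zip]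
    simp only [if_pos hi]
    have hfi : front[i]'(by omega) = d.getD i [] := by
      rw [show front[i]'(by omega) = front.getD i [] from (List.getD_eq_getElem _ _ (by omega)).symm]
      exact hfront_getD i hi
    rw [hfi]
    congr 1
    have hsi : suffixes[i]'(by omega) = suffixes.getD i 0 :=
      (List.getD_eq_getElem _ _ (by omega)).symm
    rw [hsi, hsuf_getD i hi]
    -- lastOf d[m] = 0, so the Ico i (m+1) sum collapses to the Ico i m sum
    have hdm : d.getD m [] = data.getD (n-1) [] ++ [0] := by
      rw [hd, getD_set, if_pos ⟨hm, by omega⟩]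
    have h0 : lastOf (d.getD m []) = 0 := by rw [hdm, lastOf_append]
    rw [Finset.sum_Ico_succ_top (by omega : i ≤ m), h0, add_zero]
  · -- i ≥ m: the untouched last row
    simp only [if_neg hi]
    rw [List.getElem_append_right (by rw [hziplen]; omega)]
    rw [List.getElem_drop]
    have hidx : front.length + (i - ((front.zip suffixes).map (fun q => q.1 ++ [q.2])).length) = i := by
      rw [hziplen]; rw [hfrontlen]; omega
    simp only [hidx]
    exact List.getD_eq_getElem _ _ (by omega)

-- ===== VERDICT (by name: the statement is the Claim_ definition above) =====
theorem predicate_spec : Claim_equal_predicate := by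
  intro data _ hpre
  unfold Spec_predicate
  exact predicate_spec_aux data hpre.1
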